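-- pv_equiv track=rewrite | github.com/leshless/my | cntrea/inf/dp/3.py | foo
-- ===== SOURCE A (Python) =====
-- def foo(row, k):
--     n = len(row)
--     res = 1
--     prev = row[0]
--
--     for i in range(1, n):
--         if row[i] - row[i-1] - 1 > k:
--             prev = row[i]
--         else:
--             res = max(res, row[i] - prev + 1)
--
--     return res
-- ===== SOURCE B (Python) =====
-- def foo(row, k):
--     # Phase 1: partition row into maximal segments whose consecutive gaps stay <= k.
--     segments = []
--     cur = [row[0]]
--     for x in row[1:]:
--         if x - cur[-1] - 1 > k:
--             segments.append(cur)
--             cur = [x]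
--         else:
--             cur.append(x)
--     segments.append(cur)
--     # Phase 2: best window of a segment is max(seg) - seg[0] + 1; take the overall best.
--     return max(max(seg) - seg[0] + 1 for seg in segments)
-- ===== Notes on version B (the rewrite author's own statement) =====
-- stated objective: alternative
-- what changed: A's single incremental pass with a running max and a resettable baseline is replaced by a two-phase group-then-reduce: first build the explicit list of maximal segments whose consecutive gaps stay within k, then take the max over segments of max(seg) - seg[0] + 1.
import Mathlib
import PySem

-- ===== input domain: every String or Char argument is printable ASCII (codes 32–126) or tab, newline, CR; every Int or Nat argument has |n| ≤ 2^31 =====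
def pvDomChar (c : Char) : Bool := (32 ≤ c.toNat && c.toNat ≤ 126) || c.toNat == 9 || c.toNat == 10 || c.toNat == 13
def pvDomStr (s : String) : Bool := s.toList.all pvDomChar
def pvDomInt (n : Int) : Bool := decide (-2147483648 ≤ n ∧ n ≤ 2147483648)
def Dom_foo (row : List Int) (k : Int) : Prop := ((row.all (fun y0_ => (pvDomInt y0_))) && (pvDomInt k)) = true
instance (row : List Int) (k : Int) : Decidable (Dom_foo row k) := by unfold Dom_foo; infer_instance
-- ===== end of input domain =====

-- B replaces A's single incremental running-max pass by an explicit two-phase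
-- group-into-segments-then-reduce decomposition (alternative, same asymptotic cost).


-- ===== PORT A =====
def bodyA (row : List Int) (k : Int) (s : Int × Int) (i : Int) : Int × Int :=
  if PySem.List.pyGetD row i 0 - PySem.List.pyGetD row (i-1) 0 - 1 > k then
    (s.1, PySem.List.pyGetD row i 0)
  else
    (max s.1 (PySem.List.pyGetD row i 0 - s.2 + 1), s.2)

def foo (row : List Int) (k : Int) : Int :=
  ((PySem.List.pyRange 1 (row.length : Int) 1).foldl (bodyA row k)
    (1, PySem.List.pyGetD row 0 0)).1

-- ===== PORT B =====
def stepB (k : Int) (s : List (List Int) × List Int) (x : Int) : List (List Int) × List Int :=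
  if x - PySem.List.pyGetD s.2 (-1) 0 - 1 > k then (s.1 ++ [s.2], [x])
  else (s.1, s.2 ++ [x])

def fseg (seg : List Int) : Int :=
  (PySem.List.max? seg (fun y => y)).getD 0 - PySem.List.pyGetD seg 0 0 + 1

def foo_alt (row : List Int) (k : Int) : Int :=
  match row with
  | [] => 0   -- row[0] raises IndexError in Python; outside Pre_foo
  | r0 :: rest =>
    let st := rest.foldl (stepB k) ([], [r0])
    let vals := (st.1 ++ [st.2]).map fseg
    (PySem.List.max? vals (fun y => y)).getD 0

-- ===== PRECONDITION & SPEC =====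
-- Pre_foo excludes only the empty list, on which A raises IndexError (row[0]).
def Pre_foo (row : List Int) (k : Int) : Prop := row ≠ []
instance (row : List Int) (k : Int) : Decidable (Pre_foo row k) := by unfold Pre_foo; infer_instance
def pvWitness_foo : List Int × Int := ([1, 2, 5, 6], 1)

def Spec_foo (row : List Int) (k : Int) (out : Int) : Prop := out = foo_alt row k
instance (row : List Int) (k : Int) (out : Int) : Decidable (Spec_foo row k out) := by unfold Spec_foo; infer_instance

-- ===== CLAIM (what is proved, stated in full; the proofs are below) =====
def Claim_equal_foo : Prop := ∀ (row : List Int) (k : Int), Dom_foo row k → Pre_foo row k → Spec_foo row k (foo row k)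

-- ===== LEMMAS AND PROOFS =====

-- common reference loop: state (res, prev, p) where p is the previous element
def stepF (k : Int) (s : Int × Int × Int) (x : Int) : Int × Int × Int :=
  if x - s.2.2 - 1 > k then (s.1, x, x) else (max s.1 (x - s.2.1 + 1), s.2.1, x)

lemma stepF_last (k : Int) : ∀ (xs : List Int) (res prev p : Int),
    (xs.foldl (stepF k) (res, prev, p)).2.2 = xs.getLastD p := by
  intro xs; induction xs with
  | nil => intros; rfl
  | cons x xs ih =>
    intro res prev p
    simp only [List.foldl_cons, stepF, List.getLastD_cons]
    split_ifs <;> exact ih _ _ _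

lemma foldl_max_max (l : List Int) : ∀ (a b : Int),
    List.foldl max (max a b) l = max a (List.foldl max b l) := by
  induction l with
  | nil => intros; rfl
  | cons x xs ih =>
    intro a b
    simp only [List.foldl_cons, max_assoc]
    exact ih a (max b x)

lemma foldl_max_cons (l : List Int) (a b : Int) :
    List.foldl max a (b :: l) = max (List.foldl max a l) b := by
  rw [List.foldl_cons, show max a b = max b a from max_comm _ _, foldl_max_max]
  exact max_comm _ _

lemma stepF_max (k : Int) : ∀ (xs : List Int) (a b prev p : Int),
    (xs.foldl (stepF k) (max a b, prev, p)).1 = max a ((xs.foldl (stepF k) (b, prev, p)).1) := by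
  intro xs; induction xs with
  | nil => intros; rfl
  | cons x xs ih =>
    intro a b prev p
    simp only [List.foldl_cons, stepF]
    split_ifs
    · exact ih a b x x
    · rw [max_assoc]; exact ih a _ prev x

lemma pyGetD_append_left {α : Type} (us vs : List α) (i : Int) (d : α)
    (h0 : 0 ≤ i) (h1 : i < us.length) :
    PySem.List.pyGetD (us ++ vs) i d = PySem.List.pyGetD us i d := by
  rw [PySem.List.pyGetD_eq_getElem (us ++ vs) d h0 (by simp only [List.length_append]; push_cast; omega),
      PySem.List.pyGetD_eq_getElem us d h0 h1]
  exact List.getElem_append_left (by omega)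

lemma getElem_length_cons : ∀ (ys : List Int) (r0 : Int) (h : ys.length < (r0 :: ys).length),
    (r0 :: ys)[ys.length] = ys.getLastD r0 := by
  intro ys
  induction ys with
  | nil => intros; rfl
  | cons y t ih =>
    intro r0 h
    simp only [List.length_cons, List.getElem_cons_succ, List.getLastD_cons]
    exact ih y (by simp)

lemma pyGetD_append_length {α : Type} (us : List α) (x : α) (d : α) :
    PySem.List.pyGetD (us ++ [x]) (us.length : Int) d = x := by
  rw [PySem.List.pyGetD_eq_getElem (us ++ [x]) d (Int.natCast_nonneg _) (by simp only [List.length_append, List.length_cons, List.length_nil]; push_cast; omega)]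
  simp

lemma fseg_cons (c0 : Int) (t : List Int) :
    fseg (c0 :: t) = t.foldl max c0 - c0 + 1 := by
  simp [fseg, PySem.List.max?_id_cons, PySem.List.pyGetD_zero_cons]

lemma fseg_snoc (c0 : Int) (t : List Int) (x : Int) :
    fseg (c0 :: (t ++ [x])) = max (fseg (c0 :: t)) (x - c0 + 1) := by
  simp only [fseg_cons, List.foldl_append, List.foldl_cons, List.foldl_nil]
  omega

lemma one_le_fseg_cons (c0 : Int) (t : List Int) : 1 ≤ fseg (c0 :: t) := by
  have := (PySem.List.le_foldl_max t c0).1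
  rw [fseg_cons]; omega

-- A's index loop equals the reference loop on the tail
lemma A_eq_ref (k r0 : Int) : ∀ (rest : List Int),
    ((PySem.List.pyRange 1 ((r0 :: rest).length : Int) 1).foldl (bodyA (r0 :: rest) k)
      (1, PySem.List.pyGetD (r0 :: rest) 0 0))
    = ((rest.foldl (stepF k) (1, r0, r0)).1, (rest.foldl (stepF k) (1, r0, r0)).2.1) := by
  intro rest
  induction rest using List.reverseRecOn with
  | nil => simp [PySem.List.pyRange_one_eq_nil, PySem.List.pyGetD_zero_cons]
  | append_singleton ys x ih =>
    have hlen : (((r0 :: (ys ++ [x])).length : Int)) = ((ys.length : Int) + 1) + 1 := by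
      simp only [List.length_cons, List.length_append, List.length_cons, List.length_nil]
      push_cast; omega
    rw [hlen, PySem.List.pyRange_one_succ_right (by omega), List.foldl_append]
    have hrow : r0 :: (ys ++ [x]) = (r0 :: ys) ++ [x] := by simp
    have hcongr : (PySem.List.pyRange 1 ((ys.length : Int) + 1) 1).foldl
        (bodyA (r0 :: (ys ++ [x])) k) (1, PySem.List.pyGetD (r0 :: (ys ++ [x])) 0 0)
        = (PySem.List.pyRange 1 (((r0 :: ys).length : Int)) 1).foldl
        (bodyA (r0 :: ys) k) (1, PySem.List.pyGetD (r0 :: ys) 0 0) := by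
      rw [show (((r0 :: ys).length : Int)) = (ys.length : Int) + 1 by push_cast; simp]
      rw [PySem.List.pyGetD_zero_cons, PySem.List.pyGetD_zero_cons]
      apply PySem.List.foldl_congr_mem
      intro s i hi
      have hmem := (PySem.List.mem_pyRange_one).1 hi
      unfold bodyA
      rw [hrow, pyGetD_append_left _ _ i 0 (by omega) (by simp only [List.length_cons]; push_cast; omega),
          pyGetD_append_left _ _ (i-1) 0 (by omega) (by simp only [List.length_cons]; push_cast; omega)]
    rw [hcongr, ih]
    have hx : PySem.List.pyGetD (r0 :: (ys ++ [x])) ((ys.length : Int) + 1) 0 = x := by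
      rw [hrow, show ((ys.length : Int) + 1) = (((r0 :: ys).length : Int)) by push_cast; simp]
      exact pyGetD_append_length _ _ _
    have hp : PySem.List.pyGetD (r0 :: (ys ++ [x])) ((ys.length : Int) + 1 - 1) 0
        = ys.getLastD r0 := by
      rw [hrow, show ((ys.length : Int) + 1 - 1) = ((ys.length : Int)) by omega]
      rw [pyGetD_append_left _ _ _ 0 (by omega) (by simp only [List.length_cons]; push_cast; omega)]
      rw [PySem.List.pyGetD_eq_getElem (r0 :: ys) 0 (Int.natCast_nonneg _) (by simp only [List.length_cons]; push_cast; omega)]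
      simp only [Int.toNat_natCast]
      exact getElem_length_cons ys r0 (by simp)
    rw [List.foldl_append]
    generalize hF : List.foldl (stepF k) (1, r0, r0) ys = F
    have h22 : F.2.2 = ys.getLastD r0 := by rw [← hF]; exact stepF_last k ys 1 r0 r0
    unfold bodyA stepF
    simp only [List.foldl_cons, List.foldl_nil]
    rw [hx, hp, h22]
    split_ifs <;> rfl

-- B's segment fold + reduce equals the reference loop
lemma B_eq_ref (k : Int) : ∀ (xs : List Int) (segs : List (List Int)) (c0 : Int) (t : List Int),
    (PySem.List.max? ((((xs.foldl (stepB k) (segs, c0 :: t)).1 ++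
        [(xs.foldl (stepB k) (segs, c0 :: t)).2]).map fseg)) (fun y => y)).getD 0
    = List.foldl max
        ((xs.foldl (stepF k) (fseg (c0 :: t), c0, t.getLastD c0)).1)
        (segs.map fseg) := by
  intro xs
  induction xs with
  | nil =>
    intro segs c0 t
    simp only [List.foldl_nil, List.map_append, List.map_cons, List.map_nil]
    rcases hs : segs.map fseg with _ | ⟨v, vs⟩
    · simp [PySem.List.max?_id_cons]
    · rw [show (v :: vs) ++ [fseg (c0 :: t)] = v :: (vs ++ [fseg (c0 :: t)]) by simp,
          PySem.List.max?_id_cons]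
      simp only [Option.getD_some, List.foldl_append, List.foldl_cons, List.foldl_nil]
      rw [show max (fseg (c0 :: t)) v = max v (fseg (c0 :: t)) from max_comm _ _,
          ← List.foldl_cons, foldl_max_cons]
  | cons x xs ih =>
    intro segs c0 t
    simp only [List.foldl_cons]
    have hlast : PySem.List.pyGetD (c0 :: t) (-1) 0 = t.getLastD c0 := by
      rw [PySem.List.pyGetD_neg_one (c0 :: t) 0 (List.cons_ne_nil c0 t)]
      simp [List.getLast_eq_getLastD]
    by_cases hgap : x - t.getLastD c0 - 1 > k
    · rw [show stepB k (segs, c0 :: t) x = (segs ++ [c0 :: t], [x]) by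
        unfold stepB; simp only [hlast]; rw [if_pos hgap]]
      rw [show stepF k (fseg (c0 :: t), c0, t.getLastD c0) x = (fseg (c0 :: t), x, x) by
        unfold stepF; exact if_pos hgap]
      rw [ih (segs ++ [c0 :: t]) x []]
      simp only [List.map_append, List.map_cons, List.map_nil, List.foldl_append,
        List.foldl_cons, List.foldl_nil, List.getLastD_nil]
      rw [show fseg ([x]) = 1 by simp [fseg_cons]]
      have hdecomp : (List.foldl (stepF k) (fseg (c0 :: t), x, x) xs).1
          = max (fseg (c0 :: t)) ((List.foldl (stepF k) (1, x, x) xs).1) := by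
        conv_lhs => rw [show fseg (c0 :: t) = max (fseg (c0 :: t)) 1 by
          have := one_le_fseg_cons c0 t; omega]
        exact stepF_max k xs _ 1 x x
      rw [hdecomp, foldl_max_max]
      exact max_comm _ _
    · rw [show stepB k (segs, c0 :: t) x = (segs, c0 :: (t ++ [x])) by
        unfold stepB; simp only [hlast]; rw [if_neg hgap]; simp]
      rw [show stepF k (fseg (c0 :: t), c0, t.getLastD c0) x
            = (max (fseg (c0 :: t)) (x - c0 + 1), c0, x) by
        unfold stepF; rw [if_neg hgap]]
      rw [ih segs c0 (t ++ [x]), fseg_snoc]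
      simp

-- ===== VERDICT (by name: the statement is the Claim_ definition above) =====
theorem foo_spec : Claim_equal_foo := by
  intro row k _ hpre
  unfold Spec_foo
  match row with
  | [] => exact absurd rfl hpre
  | r0 :: rest =>
    show foo (r0 :: rest) k = foo_alt (r0 :: rest) k
    unfold foo foo_alt
    rw [show ((PySem.List.pyRange 1 (((r0 :: rest).length : Int)) 1).foldl
          (bodyA (r0 :: rest) k) (1, PySem.List.pyGetD (r0 :: rest) 0 0)).1
        = (rest.foldl (stepF k) (1, r0, r0)).1 by rw [A_eq_ref]]
    simp only []
    rw [B_eq_ref k rest [] r0 []]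
    rw [show fseg ([r0]) = 1 by simp [fseg_cons]]
    simp
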